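-- pv_equiv track=rewrite | github.com/arrio3107/tournament-cli | tournament_cli/matchmaking.py | _generate_asymmetric_matches
-- ===== SOURCE A (Python) =====
-- from itertools import combinations
--
-- def _generate_asymmetric_matches(
--     player_names: list[str],
--     team1_size: int,
--     team2_size: int
-- ) -> list[tuple]:
--     """Generate matches for asymmetric modes (NvM where N != M).
--
--     In asymmetric modes, each player participates in both positions:
--     - As part of the smaller team
--     - As part of the larger team
--     """
--     smaller_size = min(team1_size, team2_size)
--     larger_size = max(team1_size, team2_size)
--     swap_order = team1_size > team2_size
--
--     matchups = []
--     seen_matchups = set()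
--
--     # Generate all smaller teams
--     all_smaller_teams = list(combinations(player_names, smaller_size))
--     # Generate all larger teams
--     all_larger_teams = list(combinations(player_names, larger_size))
--
--     for smaller_team in all_smaller_teams:
--         for larger_team in all_larger_teams:
--             # Check for player overlap
--             if set(smaller_team) & set(larger_team):
--                 continue
--
--             # Create a normalized key to avoid duplicates
--             # For asymmetric matches, we need to track which is which
--             small_sorted = tuple(sorted(smaller_team))
--             large_sorted = tuple(sorted(larger_team))
--             matchup_key = (small_sorted, large_sorted)
--
--             if matchup_key not in seen_matchups:
--                 seen_matchups.add(matchup_key)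
--                 if swap_order:
--                     # team1_size > team2_size, so larger team is team1
--                     matchups.append((larger_team, smaller_team))
--                 else:
--                     # team1_size < team2_size, so smaller team is team1
--                     matchups.append((smaller_team, larger_team))
--
--     return matchups
-- ===== SOURCE B (Python) =====
-- from itertools import combinations
--
-- def _generate_asymmetric_matches(player_names, team1_size, team2_size):
--     smaller_size = min(team1_size, team2_size)
--     larger_size = max(team1_size, team2_size)
--     swap_order = team1_size > team2_size
--
--     # keep the first matchup seen per normalized key in an insertion-ordered dict;
--     # the result is its values, so no separate result list / seen set is threaded
--     by_key = {}
--     for smaller_team in combinations(player_names, smaller_size):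
--         taken = set(smaller_team)
--         # larger teams are drawn from the remaining players only: combinations of
--         # the filtered list are exactly the disjoint larger teams, in order
--         remaining = [p for p in player_names if p not in taken]
--         small_sorted = tuple(sorted(smaller_team))
--         for larger_team in combinations(remaining, larger_size):
--             key = (small_sorted, tuple(sorted(larger_team)))
--             by_key.setdefault(key, (larger_team, smaller_team) if swap_order
--                               else (smaller_team, larger_team))
--     return list(by_key.values())
-- ===== Notes on version B (the rewrite author's own statement) =====
-- stated objective: faster
-- what changed: B draws each larger team only from the players remaining after removing the smaller team (no per-pair overlap test over all C(n,l) combinations) and replaces A's result-list-plus-seen-set state with a single insertion-ordered dict filled via setdefault whose values are the result.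
import Mathlib
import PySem

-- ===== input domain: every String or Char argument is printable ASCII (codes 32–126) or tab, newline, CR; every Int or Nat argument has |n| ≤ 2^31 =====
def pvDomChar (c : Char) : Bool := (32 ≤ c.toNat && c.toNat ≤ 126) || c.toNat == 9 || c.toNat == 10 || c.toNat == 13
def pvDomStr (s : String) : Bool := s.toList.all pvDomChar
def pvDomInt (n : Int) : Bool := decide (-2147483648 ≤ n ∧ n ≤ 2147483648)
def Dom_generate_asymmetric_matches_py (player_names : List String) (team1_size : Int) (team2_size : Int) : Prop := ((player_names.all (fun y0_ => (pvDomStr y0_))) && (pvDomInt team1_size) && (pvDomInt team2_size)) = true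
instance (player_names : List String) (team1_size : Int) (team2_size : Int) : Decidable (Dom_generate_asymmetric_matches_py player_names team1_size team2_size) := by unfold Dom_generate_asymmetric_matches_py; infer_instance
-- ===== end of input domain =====

-- B enumerates larger teams from the remaining players only and keeps the first
-- matchup per key in one insertion-ordered dict (returned as its values), instead
-- of A's all-pairs overlap test and separate list+set state (objective: faster).

-- ===== PORT A =====
-- body of A's inner loop once the overlap test has passed
def pvABody (swap : Bool) (smaller : List String)
    (st : List (List String × List String) × PySem.Set (List String × List String))
    (larger : List String) :
    List (List String × List String) × PySem.Set (List String × List String) :=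
  let key := (PySem.List.sorted smaller (fun x => x) false,
              PySem.List.sorted larger (fun x => x) false)
  if PySem.Set.contains st.2 key then st
  else (st.1 ++ [if swap then (larger, smaller) else (smaller, larger)],
        PySem.Set.add st.2 key)

-- A's inner loop step: state is (matchups, seen_matchups)
def pvAInner (swap : Bool) (smaller : List String)
    (st : List (List String × List String) × PySem.Set (List String × List String))
    (larger : List String) :
    List (List String × List String) × PySem.Set (List String × List String) :=
  if larger.any (fun x => smaller.contains x) then st
  else pvABody swap smaller st larger

def generate_asymmetric_matches_py (player_names : List String) (team1_size : Int) (team2_size : Int) : List (List String × List String) :=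
  let smaller_size := (min team1_size team2_size).toNat
  let larger_size := (max team1_size team2_size).toNat
  let swap_order := decide (team1_size > team2_size)
  let all_smaller := PySem.List.combinations player_names smaller_size
  let all_larger := PySem.List.combinations player_names larger_size
  (all_smaller.foldl
    (fun st smaller => all_larger.foldl (pvAInner swap_order smaller) st)
    ([], PySem.Set.empty)).1

-- ===== PORT B =====
-- by_key.setdefault(key, matchup)
def pvBStep (swap : Bool) (smaller : List String) (smallSorted : List String)
    (d : PySem.Dict (List String × List String) (List String × List String))
    (larger : List String) :
    PySem.Dict (List String × List String) (List String × List String) :=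
  PySem.Dict.setdefault d (smallSorted, PySem.List.sorted larger (fun x => x) false)
    (if swap then (larger, smaller) else (smaller, larger))

def generate_asymmetric_matches_py_alt (player_names : List String) (team1_size : Int) (team2_size : Int) : List (List String × List String) :=
  let smaller_size := (min team1_size team2_size).toNat
  let larger_size := (max team1_size team2_size).toNat
  let swap_order := decide (team1_size > team2_size)
  PySem.Dict.values
    ((PySem.List.combinations player_names smaller_size).foldl
      (fun d smaller =>
        let remaining := player_names.filter (fun p => !smaller.contains p)
        let smallSorted := PySem.List.sorted smaller (fun x => x) false
        (PySem.List.combinations remaining larger_size).foldl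
          (pvBStep swap_order smaller smallSorted) d)
      PySem.Dict.empty)

-- ===== PRECONDITION & SPEC =====
-- Pre_ excludes negative team sizes: there itertools.combinations raises ValueError in A (and in B).
def Pre_generate_asymmetric_matches_py (_player_names : List String) (team1_size : Int) (team2_size : Int) : Prop :=
  0 ≤ team1_size ∧ 0 ≤ team2_size
instance (player_names : List String) (team1_size : Int) (team2_size : Int) : Decidable (Pre_generate_asymmetric_matches_py player_names team1_size team2_size) := by unfold Pre_generate_asymmetric_matches_py; infer_instance

def pvWitness_generate_asymmetric_matches_py : List String × Int × Int := (["a", "b", "c"], 1, 2)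

def Spec_generate_asymmetric_matches_py (player_names : List String) (team1_size : Int) (team2_size : Int) (out : List (List String × List String)) : Prop := out = generate_asymmetric_matches_py_alt player_names team1_size team2_size
instance (player_names : List String) (team1_size : Int) (team2_size : Int) (out : List (List String × List String)) : Decidable (Spec_generate_asymmetric_matches_py player_names team1_size team2_size out) := by unfold Spec_generate_asymmetric_matches_py; infer_instance

-- ===== CLAIM (what is proved, stated in full; the proofs are below) =====
def Claim_equal_generate_asymmetric_matches_py : Prop := ∀ (player_names : List String) (team1_size : Int) (team2_size : Int), Dom_generate_asymmetric_matches_py player_names team1_size team2_size → Pre_generate_asymmetric_matches_py player_names team1_size team2_size → Spec_generate_asymmetric_matches_py player_names team1_size team2_size (generate_asymmetric_matches_py player_names team1_size team2_size)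

-- ===== LEMMAS AND PROOFS =====

-- the simulation relation between A's (matchups, seen) state and B's dict
def pvRel (st : List (List String × List String) × PySem.Set (List String × List String))
    (d : PySem.Dict (List String × List String) (List String × List String)) : Prop :=
  st.1 = d.values ∧ ∀ k, PySem.Set.contains st.2 k = d.contains k

-- a fold that skips elements failing p equals the fold over the filtered list
theorem pv_foldl_filter {α β : Type} (p : α → Bool) (g : β → α → β) :
    ∀ (xs : List α) (st : β),
      xs.foldl (fun st x => if p x then g st x else st) st
        = (xs.filter p).foldl g st := by
  intro xs
  induction xs with
  | nil => intro st; rfl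
  | cons x xs ih =>
    intro st
    by_cases h : p x <;> simp [h, ih]

-- combinations of a filtered list = combinations whose every element passes the filter
theorem pv_combinations_filter {α : Type} (p : α → Bool) :
    ∀ (xs : List α) (r : Nat),
      PySem.List.combinations (xs.filter p) r
        = (PySem.List.combinations xs r).filter (fun c => c.all p) := by
  intro xs
  induction xs with
  | nil =>
    intro r
    cases r with
    | zero => simp [PySem.List.combinations_zero]
    | succ r => simp [PySem.List.combinations_nil_succ]
  | cons x xs ih =>
    intro r
    cases r with
    | zero => simp [PySem.List.combinations_zero]
    | succ r =>
      by_cases h : p x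
      · simp only [List.filter_cons, h, if_pos, PySem.List.combinations_cons_succ,
          List.filter_append, ih, List.filter_map]
        congr 1
        · congr 1
          apply List.filter_congr
          intro c _
          simp [Function.comp, h]
      · simp only [List.filter_cons, h, PySem.List.combinations_cons_succ,
          List.filter_append, List.filter_map]
        have : (List.filter ((fun c => c.all p) ∘ (fun c => x :: c))
            (PySem.List.combinations xs r)) = [] := by
          apply List.filter_eq_nil_iff.mpr
          intro c _
          simp [Function.comp, h]
        simp [this, ih]

-- A's guarded inner loop over all larger teams = the unguarded body over combinations of the remaining players
theorem pv_inner_filter (swap : Bool) (names : List String) (smaller : List String) (l : Nat)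
    (st : List (List String × List String) × PySem.Set (List String × List String)) :
    (PySem.List.combinations names l).foldl (pvAInner swap smaller) st
      = (PySem.List.combinations (names.filter (fun p => !smaller.contains p)) l).foldl
          (pvABody swap smaller) st := by
  rw [pv_combinations_filter, ← pv_foldl_filter (fun c => c.all (fun p => !smaller.contains p))
        (pvABody swap smaller)]
  apply PySem.List.foldl_congr_mem
  intro b a _
  unfold pvAInner
  have key : (a.all fun p => !smaller.contains p) = !(a.any fun x => smaller.contains x) := by
    simp [List.all_eq_not_any_not]
  rw [key]
  cases a.any (fun x => smaller.contains x) <;> simp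

-- folds over the same list preserve a simulation relation preserved by the steps
theorem pv_foldl_sim {α σ τ : Type} (R : σ → τ → Prop) (f : σ → α → σ) (g : τ → α → τ)
    (l : List α) (h : ∀ s t a, R s t → R (f s a) (g t a)) :
    ∀ s t, R s t → R (l.foldl f s) (l.foldl g t) := by
  induction l with
  | nil => intro s t hr; exact hr
  | cons x xs ih =>
    intro s t hr
    exact ih _ _ (h _ _ _ hr)

-- the unguarded A body and B's setdefault step preserve the simulation relation
theorem pv_step_sim (swap : Bool) (smaller : List String)
    (st : List (List String × List String) × PySem.Set (List String × List String))
    (d : PySem.Dict (List String × List String) (List String × List String))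
    (larger : List String) (hr : pvRel st d) :
    pvRel (pvABody swap smaller st larger)
      (pvBStep swap smaller (PySem.List.sorted smaller (fun x => x) false) d larger) := by
  obtain ⟨hv, hc⟩ := hr
  unfold pvABody pvBStep
  set key := (PySem.List.sorted smaller (fun x => x) false,
              PySem.List.sorted larger (fun x => x) false) with hkey
  cases hk : d.contains key with
  | true =>
    rw [PySem.Dict.setdefault_of_contains _ _ hk]
    simp only [hc, hk, if_pos]
    exact ⟨hv, hc⟩
  | false =>
    rw [PySem.Dict.setdefault_of_not_contains _ _ hk]
    simp only [hc, hk, if_neg Bool.false_ne_true]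
    have hsk : PySem.Set.contains st.2 key = false := by rw [hc]; exact hk
    constructor
    · simp [PySem.Dict.values, PySem.Dict.items_insert_of_not_contains _ _ hk, hv]
    · intro k'
      rw [PySem.Dict.contains_insert]
      unfold PySem.Set.add
      rw [hsk]
      simp [PySem.Set.contains, ← hc k', Bool.or_comm]
      cases h' : k' == key <;> simp_all

-- the initial states are related
theorem pv_rel_init : pvRel ([], PySem.Set.empty) PySem.Dict.empty := by
  constructor
  · simp [PySem.Dict.values, PySem.Dict.empty]
  · intro k; simp [PySem.Set.empty, PySem.Set.contains, PySem.Dict.contains_empty]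

-- ===== VERDICT (by name: the statement is the Claim_ definition above) =====
theorem generate_asymmetric_matches_py_spec : Claim_equal_generate_asymmetric_matches_py := by
  intro names t1 t2 _ _
  unfold Spec_generate_asymmetric_matches_py
  unfold generate_asymmetric_matches_py generate_asymmetric_matches_py_alt
  simp only []
  have := pv_foldl_sim pvRel
    (fun st smaller =>
      (PySem.List.combinations names (max t1 t2).toNat).foldl
        (pvAInner (decide (t1 > t2)) smaller) st)
    (fun d smaller =>
      (PySem.List.combinations (names.filter (fun p => !smaller.contains p))
          (max t1 t2).toNat).foldl
        (pvBStep (decide (t1 > t2)) smaller (PySem.List.sorted smaller (fun x => x) false)) d)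
    (PySem.List.combinations names (min t1 t2).toNat)
    (fun st d smaller hr => by
      dsimp only
      rw [pv_inner_filter]
      exact pv_foldl_sim pvRel _ _ _
        (fun st d larger hr => pv_step_sim _ smaller st d larger hr) st d hr)
    ([], PySem.Set.empty) PySem.Dict.empty pv_rel_init
  exact this.1
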